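-- pv_equiv track=rewrite | github.com/SimleCat/assignment | python/20150304/4f/4f.py | get_items_max_length
-- ===== SOURCE A (Python) =====
-- def get_items_max_length(msg_list):
-- 	items_len = []
-- 	for items in msg_list:
-- 		for i in range(len(items)):
-- 			if i >= len(items_len):
-- 				items_len.append(len(items[i]))
-- 			else:
-- 				if items_len[i] < len(items[i]):
-- 					items_len[i] = len(items[i])
-- 	return items_len
-- ===== SOURCE B (Python) =====
-- def get_items_max_length(msg_list):
--     # Column-wise: find the table width, then compute each column's max length directly.
--     width = max((len(row) for row in msg_list), default=0)
--     result = []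
--     for j in range(width):
--         best = None
--         for row in msg_list:
--             if j < len(row):
--                 n = len(row[j])
--                 best = n if best is None else max(best, n)
--         result.append(best)
--     return result
-- ===== Notes on version B (the rewrite author's own statement) =====
-- stated objective: alternative
-- what changed: B traverses column-by-column (width first, then one max-reduction per column) instead of A's row-by-row running-max list that is grown and updated in place.
import Mathlib
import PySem

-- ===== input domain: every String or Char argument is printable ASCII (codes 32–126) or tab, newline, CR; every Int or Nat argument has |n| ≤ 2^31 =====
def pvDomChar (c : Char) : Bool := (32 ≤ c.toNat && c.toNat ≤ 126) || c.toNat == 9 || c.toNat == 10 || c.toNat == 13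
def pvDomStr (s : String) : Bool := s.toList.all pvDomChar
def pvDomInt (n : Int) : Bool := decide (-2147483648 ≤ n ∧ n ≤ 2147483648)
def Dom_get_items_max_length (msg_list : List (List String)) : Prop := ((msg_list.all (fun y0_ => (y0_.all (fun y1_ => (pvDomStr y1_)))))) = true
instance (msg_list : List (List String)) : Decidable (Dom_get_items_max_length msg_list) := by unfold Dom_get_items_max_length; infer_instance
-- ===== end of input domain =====

-- B computes the same per-column maxima column-by-column (width first, then one max per column)
-- instead of A's row-by-row in-place running-max list; objective: alternative decomposition.


-- ===== PORT A =====
-- body of A's inner loop: one iteration 'for i in range(len(items))'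
def pvRowBody (items : List String) (al : List Int) (i : Int) : List Int :=
  let L := PySem.Str.len (PySem.List.pyGetD items i "")  -- len(items[i]); i is always in range here
  if (al.length : Int) ≤ i then al ++ [L]                 -- i >= len(items_len): append
  else if PySem.List.pyGetD al i 0 < L then PySem.List.pySetD al i L
  else al

-- A's outer-loop body: process one row
def pvRowStep (items_len : List Int) (items : List String) : List Int :=
  (PySem.List.pyRange 0 (items.length : Int) 1).foldl (pvRowBody items) items_len

def get_items_max_length (msg_list : List (List String)) : List Int :=
  msg_list.foldl pvRowStep []

-- ===== PORT B =====
def get_items_max_length_alt (msg_list : List (List String)) : List Int :=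
  -- width = max((len(row) for row in msg_list), default=0)
  let width : Int := PySem.List.maxD (msg_list.map (fun row => (row.length : Int))) (fun x => x) 0
  (PySem.List.pyRange 0 width 1).foldl (fun result j =>
    let best : Option Int := msg_list.foldl (fun b row =>
      if j < (row.length : Int) then
        let n := PySem.Str.len (PySem.List.pyGetD row j "")  -- len(row[j]); j < len(row)
        some (match b with | none => n | some m => max m n)  -- best = n if best is None else max(best, n)
      else b) none
    result ++ [best.getD 0]) []  -- best is never none here (j < width); Python appends the int

-- ===== PRECONDITION & SPEC =====
def Spec_get_items_max_length (msg_list : List (List String)) (out : List Int) : Prop := out = get_items_max_length_alt msg_list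
instance (msg_list : List (List String)) (out : List Int) : Decidable (Spec_get_items_max_length msg_list out) := by unfold Spec_get_items_max_length; infer_instance

-- ===== CLAIM (what is proved, stated in full; the proofs are below) =====
def Claim_equal_get_items_max_length : Prop := ∀ (msg_list : List (List String)), Dom_get_items_max_length msg_list → Spec_get_items_max_length msg_list (get_items_max_length msg_list)

-- ===== LEMMAS AND PROOFS =====

-- pointwise max of an accumulator with one row's lengths, extending where the row is longer
def mergeLens : List Int → List String → List Int
  | al, [] => al
  | [], s :: ss => PySem.Str.len s :: mergeLens [] ss
  | a :: as, s :: ss => max a (PySem.Str.len s) :: mergeLens as ss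

-- 'best = n if best is None else max(best, n)'
def pvOmaxI (b : Option Int) (n : Int) : Int := match b with | none => n | some m => max m n

def pvOmax2 (a b : Option Int) : Option Int :=
  match a, b with
  | none, b => b
  | some x, none => some x
  | some x, some y => some (max x y)

def pvColStep (j : Nat) (b : Option Int) (r : List String) : Option Int :=
  if j < r.length then some (pvOmaxI b (PySem.Str.len (r.getD j ""))) else b

def pvColv (rows : List (List String)) (j : Nat) : Option Int := rows.foldl (pvColStep j) none

def pvWidthN (rows : List (List String)) : Nat := rows.foldl (fun w r => max w r.length) 0

theorem pvOmax2_none_right (a : Option Int) : pvOmax2 a none = a := by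
  cases a <;> rfl

theorem pvOmax2_assoc (a b c : Option Int) : pvOmax2 (pvOmax2 a b) c = pvOmax2 a (pvOmax2 b c) := by
  cases a <;> cases b <;> cases c <;> simp [pvOmax2, max_assoc]

theorem pvRowBody_cons_succ (s : String) (ss : List String) (x : Int) (al : List Int) (k : Nat) :
    pvRowBody (s :: ss) (x :: al) ((k : Int) + 1) = x :: pvRowBody ss al (k : Int) := by
  have h1 : ((k : Int) + 1) = ((k + 1 : Nat) : Int) := by push_cast; ring
  simp only [pvRowBody, h1, PySem.List.pyGetD_natCast, PySem.List.pySetD_natCast,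
    List.getD_cons_succ, List.set_cons_succ, List.length_cons]
  by_cases hlen : (al.length : Int) ≤ (k : Int)
  · have h2 : ((al.length + 1 : Nat) : Int) ≤ ((k + 1 : Nat) : Int) := by push_cast; omega
    rw [if_pos h2, if_pos hlen, List.cons_append]
  · have h2 : ¬ ((al.length + 1 : Nat) : Int) ≤ ((k + 1 : Nat) : Int) := by push_cast; omega
    rw [if_neg h2, if_neg hlen]
    split_ifs <;> rfl

theorem pvRowBody_zero_nil (s : String) (ss : List String) :
    pvRowBody (s :: ss) [] 0 = [PySem.Str.len s] := by
  simp [pvRowBody, PySem.List.pyGetD_zero_cons]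

theorem pvRowBody_zero_cons (s : String) (ss : List String) (a : Int) (as : List Int) :
    pvRowBody (s :: ss) (a :: as) 0 = max a (PySem.Str.len s) :: as := by
  have hset : PySem.List.pySetD (a :: as) 0 (PySem.Str.len s) = PySem.Str.len s :: as := by
    rw [PySem.List.pySetD_of_nonneg (a :: as) (PySem.Str.len s) (by omega)]; rfl
  simp only [pvRowBody, PySem.List.pyGetD_zero_cons, List.length_cons, hset]
  rw [if_neg (by push_cast; omega)]
  rcases lt_or_ge a (PySem.Str.len s) with h | h
  · rw [if_pos h, max_eq_right h.le]
  · rw [if_neg (not_lt.mpr h), max_eq_left h]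

theorem pvShiftA (ks : List Nat) (s : String) (ss : List String) (x : Int) (al : List Int) :
    ks.foldl (fun (b : List Int) (k : Nat) => pvRowBody (s :: ss) b ((k : Int) + 1)) (x :: al)
      = x :: ks.foldl (fun (b : List Int) (k : Nat) => pvRowBody ss b (k : Int)) al := by
  induction ks generalizing x al with
  | nil => rfl
  | cons k ks ih =>
      simp only [List.foldl_cons, pvRowBody_cons_succ]
      exact ih x (pvRowBody ss al (k : Int))

theorem pvInnerA (items : List String) (al : List Int) :
    (List.range items.length).foldl (fun (b : List Int) (k : Nat) => pvRowBody items b (k : Int)) al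
      = mergeLens al items := by
  induction items generalizing al with
  | nil => simp [mergeLens]
  | cons s ss ih =>
      rw [List.length_cons, List.range_succ_eq_map, List.foldl_cons, List.foldl_map]
      have hshift :
          (List.range ss.length).foldl
              (fun (b : List Int) (k : Nat) => pvRowBody (s :: ss) b ((Nat.succ k : Nat) : Int))
              (pvRowBody (s :: ss) al ((0 : Nat) : Int))
            = (List.range ss.length).foldl
                (fun (b : List Int) (k : Nat) => pvRowBody (s :: ss) b ((k : Int) + 1))
                (pvRowBody (s :: ss) al ((0 : Nat) : Int)) := by
        apply PySem.List.foldl_congr_mem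
        intro acc k _
        have hk : ((Nat.succ k : Nat) : Int) = (k : Int) + 1 := by push_cast; ring
        rw [hk]
      rw [hshift]
      cases al with
      | nil =>
          rw [show pvRowBody (s :: ss) [] ((0 : Nat) : Int) = [PySem.Str.len s] from
            pvRowBody_zero_nil s ss]
          rw [show ([PySem.Str.len s] : List Int) = PySem.Str.len s :: ([] : List Int) from rfl]
          rw [pvShiftA, ih, mergeLens]
      | cons a as =>
          rw [show pvRowBody (s :: ss) (a :: as) ((0 : Nat) : Int) = max a (PySem.Str.len s) :: as from
            pvRowBody_zero_cons s ss a as]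
          rw [pvShiftA, ih, mergeLens]

theorem pvRowStep_eq (al : List Int) (items : List String) :
    pvRowStep al items = mergeLens al items := by
  rw [pvRowStep, PySem.List.pyRange_zero_natCast, List.foldl_map]
  exact pvInnerA items al

theorem pvA_eq (rows : List (List String)) :
    get_items_max_length rows = rows.foldl mergeLens [] := by
  rw [get_items_max_length]
  have h : pvRowStep = mergeLens := funext fun al => funext fun items => pvRowStep_eq al items
  rw [h]

theorem pvMergeLens_get (r : List String) (al : List Int) (j : Nat) :
    (mergeLens al r)[j]? =
      pvOmax2 al[j]? (if j < r.length then some (PySem.Str.len (r.getD j "")) else none) := by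
  induction r generalizing al j with
  | nil => simp [mergeLens, pvOmax2_none_right]
  | cons s ss ih =>
      cases al with
      | nil =>
          cases j with
          | zero => simp [mergeLens, pvOmax2]
          | succ j =>
              simp only [mergeLens, List.getElem?_cons_succ, ih, List.getElem?_nil,
                List.length_cons, List.getD_cons_succ, Nat.add_lt_add_iff_right]
      | cons a as =>
          cases j with
          | zero => simp [mergeLens, pvOmax2]
          | succ j =>
              simp only [mergeLens, List.getElem?_cons_succ, ih, List.length_cons,
                List.getD_cons_succ, Nat.add_lt_add_iff_right]

theorem pvColStep_none (j : Nat) (b : Option Int) (r : List String) :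
    pvColStep j b r = pvOmax2 b (pvColStep j none r) := by
  cases b <;> by_cases h : j < r.length <;> simp [pvColStep, pvOmaxI, pvOmax2, h]

theorem pvColv_start (rows : List (List String)) (b : Option Int) (j : Nat) :
    rows.foldl (pvColStep j) b = pvOmax2 b (pvColv rows j) := by
  induction rows generalizing b with
  | nil => simp [pvColv, pvOmax2_none_right]
  | cons r rs ih =>
      rw [pvColv, List.foldl_cons, List.foldl_cons, ih, ih (pvColStep j none r),
        pvColStep_none j b r, pvOmax2_assoc]

theorem pvColv_cons (r : List String) (rs : List (List String)) (j : Nat) :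
    pvColv (r :: rs) j = pvOmax2 (pvColStep j none r) (pvColv rs j) := by
  rw [pvColv, List.foldl_cons]
  exact pvColv_start rs (pvColStep j none r) j

theorem pvFold_get (rows : List (List String)) (al : List Int) (j : Nat) :
    (rows.foldl mergeLens al)[j]? = pvOmax2 al[j]? (pvColv rows j) := by
  induction rows generalizing al with
  | nil => simp [pvColv, pvOmax2_none_right]
  | cons r rs ih =>
      rw [List.foldl_cons, ih, pvMergeLens_get, pvOmax2_assoc, pvColv_cons]
      have hc : (if j < r.length then some (PySem.Str.len (r.getD j "")) else none)
          = pvColStep j none r := by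
        by_cases h : j < r.length <;> simp [pvColStep, pvOmaxI, h]
      rw [hc]

theorem pvWidthN_ge (rows : List (List String)) (r : List String) (h : r ∈ rows) :
    r.length ≤ pvWidthN rows := by
  have hmap : pvWidthN rows = (rows.map List.length).foldl max 0 := by
    rw [List.foldl_map]; rfl
  rw [hmap]
  exact (PySem.List.le_foldl_max (rows.map List.length) 0).2 r.length (List.mem_map_of_mem h)

theorem pvLt_widthN_aux (rows : List (List String)) (j : Nat) :
    ∀ a : Nat, j < rows.foldl (fun w r => max w r.length) a → j < a ∨ ∃ r ∈ rows, j < r.length := by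
  induction rows with
  | nil => intro a ha; exact Or.inl ha
  | cons r rs ih =>
      intro a ha
      rcases ih (max a r.length) ha with h' | ⟨r', hr', hj⟩
      · rcases Nat.lt_or_ge j a with h2 | h2
        · exact Or.inl h2
        · exact Or.inr ⟨r, List.mem_cons_self, by omega⟩
      · exact Or.inr ⟨r', List.mem_cons_of_mem r hr', hj⟩

theorem pvLt_widthN (rows : List (List String)) (j : Nat) (h : j < pvWidthN rows) :
    ∃ r ∈ rows, j < r.length := by
  rcases pvLt_widthN_aux rows j 0 h with h' | h'
  · omega
  · exact h'

theorem pvColv_none (rows : List (List String)) (j : Nat) (h : ∀ r ∈ rows, r.length ≤ j) :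
    pvColv rows j = none := by
  induction rows with
  | nil => rfl
  | cons r rs ih =>
      rw [pvColv, List.foldl_cons]
      have hr : ¬ j < r.length := by have := h r List.mem_cons_self; omega
      rw [show pvColStep j none r = none by simp [pvColStep, hr]]
      exact ih fun r' hr' => h r' (List.mem_cons_of_mem r hr')

theorem pvColv_ne_none (rows : List (List String)) (j : Nat) (h : ∃ r ∈ rows, j < r.length) :
    pvColv rows j ≠ none := by
  induction rows with
  | nil => rcases h with ⟨r, hr, _⟩; simp at hr
  | cons r rs ih =>
      rw [pvColv_cons]
      rcases h with ⟨r', hr', hj⟩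
      rcases List.mem_cons.mp hr' with rfl | hmem
      · rw [show pvColStep j none r' = some (PySem.Str.len (r'.getD j "")) by
          simp [pvColStep, pvOmaxI, hj]]
        cases pvColv rs j <;> simp [pvOmax2]
      · have hne := ih ⟨r', hmem, hj⟩
        rcases Option.ne_none_iff_exists'.mp hne with ⟨v, hv⟩
        rw [hv]
        cases pvColStep j none r <;> simp [pvOmax2]

theorem pvCastFold (rs : List (List String)) (a : Nat) :
    ((rs.foldl (fun w r => max w r.length) a : Nat) : Int)
      = (rs.map (fun r => (r.length : Int))).foldl max (a : Int) := by
  induction rs generalizing a with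
  | nil => rfl
  | cons r rs ih =>
      rw [List.foldl_cons, List.map_cons, List.foldl_cons, ih]
      congr 1
      push_cast
      rfl

theorem pvW_eq (rows : List (List String)) :
    PySem.List.maxD (rows.map (fun row => (row.length : Int))) (fun x => x) 0
      = (pvWidthN rows : Int) := by
  cases rows with
  | nil => simp [PySem.List.maxD_nil, pvWidthN]
  | cons r rs =>
      rw [List.map_cons, PySem.List.maxD_id_cons, pvWidthN, List.foldl_cons]
      rw [show max 0 r.length = r.length by omega]
      exact (pvCastFold rs r.length).symm

theorem pvB_eq (rows : List (List String)) :
    get_items_max_length_alt rows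
      = (List.range (pvWidthN rows)).map (fun k => (pvColv rows k).getD 0) := by
  rw [get_items_max_length_alt]
  simp only [pvW_eq, PySem.List.pyRange_zero_natCast, List.foldl_map,
    PySem.List.foldl_append_singleton_eq_map]
  rw [List.nil_append]
  apply List.map_congr_left
  intro k _
  congr 1
  rw [pvColv]
  apply PySem.List.foldl_congr_mem
  intro b row _
  rw [pvColStep, PySem.List.pyGetD_natCast]
  by_cases h : k < row.length
  · rw [if_pos (by exact_mod_cast h), if_pos h]
    rfl
  · rw [if_neg (by exact_mod_cast h), if_neg h]

theorem pvMain (rows : List (List String)) :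
    get_items_max_length rows = get_items_max_length_alt rows := by
  rw [pvA_eq, pvB_eq]
  apply List.ext_getElem?
  intro n
  rw [pvFold_get rows [] n]
  simp only [List.getElem?_nil]
  rw [show pvOmax2 none (pvColv rows n) = pvColv rows n from rfl]
  by_cases h : n < pvWidthN rows
  · rcases Option.ne_none_iff_exists'.mp (pvColv_ne_none rows n (pvLt_widthN rows n h)) with ⟨v, hv⟩
    rw [hv, List.getElem?_map, List.getElem?_range h]
    simp [hv]
  · rw [pvColv_none rows n (fun r hr => by have := pvWidthN_ge rows r hr; omega)]
    rw [List.getElem?_map, List.getElem?_eq_none (by simpa using h)]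
    rfl

-- ===== VERDICT (by name: the statement is the Claim_ definition above) =====
theorem get_items_max_length_spec : Claim_equal_get_items_max_length := by
  intro msg_list _
  unfold Spec_get_items_max_length
  exact pvMain msg_list
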